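-- pv_equiv track=rewrite | github.com/didier-building/porfolio | backend/portfolio_backend/api/skill_recommender.py | _suggest_practice_projects
-- ===== SOURCE A (Python) =====
-- from typing import Dict, List, Any, Optional
--
-- def _suggest_practice_projects(skills: List[str], target_role: str) -> List[Dict[str, str]]:
--     """Suggest practice projects to develop skills"""
--     projects = []
--
--     if any('python' in skill.lower() for skill in skills):
--         projects.append({
--             'name': 'REST API with Django',
--             'description': 'Build a complete REST API with authentication and database integration',
--             'skills_practiced': 'Python, Django, REST API, PostgreSQL'
--         })
--
--     if any('react' in skill.lower() for skill in skills):
--         projects.append({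
--             'name': 'Modern Web Application',
--             'description': 'Create a responsive web app with React and modern state management',
--             'skills_practiced': 'React, JavaScript, CSS, State Management'
--         })
--
--     if any('aws' in skill.lower() or 'cloud' in skill.lower() for skill in skills):
--         projects.append({
--             'name': 'Cloud-Native Application',
--             'description': 'Deploy a scalable application using cloud services and containers',
--             'skills_practiced': 'AWS, Docker, Kubernetes, CI/CD'
--         })
--
--     return projects
-- ===== SOURCE B (Python) =====
-- _CATALOG = [
--     (('python',), {
--         'name': 'REST API with Django',
--         'description': 'Build a complete REST API with authentication and database integration',
--         'skills_practiced': 'Python, Django, REST API, PostgreSQL'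
--     }),
--     (('react',), {
--         'name': 'Modern Web Application',
--         'description': 'Create a responsive web app with React and modern state management',
--         'skills_practiced': 'React, JavaScript, CSS, State Management'
--     }),
--     (('aws', 'cloud'), {
--         'name': 'Cloud-Native Application',
--         'description': 'Deploy a scalable application using cloud services and containers',
--         'skills_practiced': 'AWS, Docker, Kubernetes, CI/CD'
--     }),
-- ]
--
--
-- def _suggest_practice_projects(skills, target_role):
--     """Join all lowercased skills into one space-separated blob, then filter a
--     data-driven catalog by keyword membership in the blob.  Correct because no
--     catalog keyword contains a space, so a match cannot span the separator."""
--     blob = ' '.join(skill.lower() for skill in skills)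
--     return [dict(project) for keywords, project in _CATALOG
--             if any(k in blob for k in keywords)]
-- ===== Notes on version B (the rewrite author's own statement) =====
-- stated objective: faster
-- what changed: Replaces A's three hard-coded any() generator scans over skills by joining all lowercased skills into one space-separated blob and filtering a data-driven catalog of (keywords, project) rules by substring membership in the blob; correct since no keyword contains a space, so a match cannot span the join separator.
import Mathlib
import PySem

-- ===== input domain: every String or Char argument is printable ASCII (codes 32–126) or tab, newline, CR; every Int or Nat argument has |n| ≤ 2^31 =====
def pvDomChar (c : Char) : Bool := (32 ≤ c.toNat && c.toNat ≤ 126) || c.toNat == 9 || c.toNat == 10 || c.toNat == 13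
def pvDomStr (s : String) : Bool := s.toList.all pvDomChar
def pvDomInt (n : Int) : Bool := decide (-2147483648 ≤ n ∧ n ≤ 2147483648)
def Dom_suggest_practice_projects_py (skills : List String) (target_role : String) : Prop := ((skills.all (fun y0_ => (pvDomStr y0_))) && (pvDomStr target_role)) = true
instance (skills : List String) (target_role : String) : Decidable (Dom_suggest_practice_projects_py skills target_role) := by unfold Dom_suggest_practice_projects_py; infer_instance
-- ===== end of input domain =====

-- B joins all lowercased skills into one space-separated blob and filters a data-driven
-- catalog of (keywords, project) rules by keyword membership in the blob (alternative
-- decomposition; correct since no keyword contains a space, so no match spans the separator).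

-- ===== PORT A =====
def pvProjPython : List (String × String) :=
  [("name", "REST API with Django"),
   ("description", "Build a complete REST API with authentication and database integration"),
   ("skills_practiced", "Python, Django, REST API, PostgreSQL")]

def pvProjReact : List (String × String) :=
  [("name", "Modern Web Application"),
   ("description", "Create a responsive web app with React and modern state management"),
   ("skills_practiced", "React, JavaScript, CSS, State Management")]

def pvProjCloud : List (String × String) :=
  [("name", "Cloud-Native Application"),
   ("description", "Deploy a scalable application using cloud services and containers"),
   ("skills_practiced", "AWS, Docker, Kubernetes, CI/CD")]

def suggest_practice_projects_py (skills : List String) (target_role : String) : List (List (String × String)) :=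
  let projects : List (List (String × String)) := []
  let projects := if skills.any (fun skill => PySem.Str.isIn "python" (PySem.Str.lower skill)) then
      projects ++ [pvProjPython] else projects
  let projects := if skills.any (fun skill => PySem.Str.isIn "react" (PySem.Str.lower skill)) then
      projects ++ [pvProjReact] else projects
  let projects := if skills.any (fun skill => PySem.Str.isIn "aws" (PySem.Str.lower skill) || PySem.Str.isIn "cloud" (PySem.Str.lower skill)) then
      projects ++ [pvProjCloud] else projects
  projects

-- ===== PORT B =====
def pvCatalog : List (List String × List (String × String)) :=
  [(["python"], pvProjPython),
   (["react"], pvProjReact),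
   (["aws", "cloud"], pvProjCloud)]

def suggest_practice_projects_py_alt (skills : List String) (target_role : String) : List (List (String × String)) :=
  let blob := PySem.Str.join " " (skills.map (fun skill => PySem.Str.lower skill))
  (pvCatalog.filter (fun rule => rule.1.any (fun k => PySem.Str.isIn k blob))).map (fun rule => rule.2)

-- ===== PRECONDITION & SPEC =====
def Spec_suggest_practice_projects_py (skills : List String) (target_role : String) (out : List (List (String × String))) : Prop := out = suggest_practice_projects_py_alt skills target_role
instance (skills : List String) (target_role : String) (out : List (List (String × String))) : Decidable (Spec_suggest_practice_projects_py skills target_role out) := by unfold Spec_suggest_practice_projects_py; infer_instance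

-- ===== CLAIM =====
def Claim_equal_suggest_practice_projects_py : Prop := ∀ (skills : List String) (target_role : String), Dom_suggest_practice_projects_py skills target_role → Spec_suggest_practice_projects_py skills target_role (suggest_practice_projects_py skills target_role)

-- ===== LEMMAS AND PROOFS =====

theorem pv_any_or {α : Type} (xs : List α) (f g : α → Bool) :
    xs.any (fun x => f x || g x) = (xs.any f || xs.any g) := by
  induction xs with
  | nil => rfl
  | cons x xs ih => simp only [List.any_cons, ih]; cases f x <;> cases g x <;> simp

-- an infix of `a ++ c :: b` avoiding `c` is an infix of `a` or of `b`
theorem pv_infix_append_cons_iff (sub a b : List Char) (c : Char)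
    (hc : c ∉ sub) :
    sub <:+: a ++ c :: b ↔ (sub <:+: a ∨ sub <:+: b) := by
  constructor
  · rintro ⟨l, r, h⟩
    have hdrop : sub <+: (a ++ c :: b).drop l.length := by
      rw [← h]
      simp [List.prefix_append]
    by_cases hj : l.length + sub.length ≤ a.length
    · left
      have hle : l.length ≤ a.length := by
        have := sub.length; omega
      rw [List.drop_append_of_le_length hle] at hdrop
      have htake : sub = (a.drop l.length ++ c :: b).take sub.length :=
        (List.prefix_iff_eq_take.mp hdrop)
      rw [List.take_append_of_le_length (by simp; omega)] at htake
      exact ((htake ▸ (List.take_prefix _ _)).isInfix).trans (List.drop_suffix _ _).isInfix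
    · by_cases hla : l.length ≤ a.length
      · -- c ∈ sub: contradiction
        exfalso
        obtain ⟨t, ht⟩ := hdrop
        rw [List.drop_append_of_le_length hla] at ht
        have hi : a.length - l.length < sub.length := by omega
        have hlen : (a.drop l.length).length = a.length - l.length := by simp
        have : sub[a.length - l.length]'hi = c := by
          have h1 : (sub ++ t)[a.length - l.length]'(by simp; omega) = sub[a.length - l.length]'hi :=
            List.getElem_append_left hi
          have h2 : (sub ++ t)[a.length - l.length]'(by simp; omega)
              = (List.drop l.length a ++ c :: b)[a.length - l.length]'(by simp; try omega) :=
            List.getElem_of_eq ht _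
          rw [← h1, h2, List.getElem_append_right (by omega)]
          simp [hlen]
        exact hc (this ▸ List.getElem_mem hi)
      · right
        rw [Nat.not_le] at hla
        have : (a ++ c :: b).drop l.length = b.drop (l.length - a.length - 1) := by
          rw [List.drop_append]
          have h1 : a.drop l.length = [] := by simp; omega
          rw [h1, List.nil_append]
          have h2 : l.length - a.length = (l.length - a.length - 1) + 1 := by omega
          rw [h2, List.drop_succ_cons]
          simp
        rw [this] at hdrop
        exact hdrop.isInfix.trans (List.drop_suffix _ _).isInfix
  · rintro (h | h)
    · exact h.trans ⟨[], c :: b, by simp⟩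
    · exact h.trans ⟨a ++ [c], [], by simp⟩

-- a space-free nonempty pattern is an infix of the space-join iff it is an infix of some part
theorem pv_infix_join_space (sub : List Char) (hne : sub ≠ []) (hsp : ' ' ∉ sub) :
    ∀ (parts : List (List Char)),
      (sub <:+: PySem.Chars.join [' '] parts ↔ ∃ p ∈ parts, sub <:+: p) := by
  intro parts
  induction parts with
  | nil =>
    simp [PySem.Chars.join_nil, List.infix_nil, hne]
  | cons p rest ih =>
    cases rest with
    | nil => simp [PySem.Chars.join_singleton]
    | cons q t =>
      rw [PySem.Chars.join_cons_cons, List.append_assoc, List.singleton_append,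
          pv_infix_append_cons_iff sub p _ ' ' hsp, ih]
      simp

theorem pv_isIn_blob (k : String) (skills : List String)
    (hne : k.toList ≠ []) (hsp : ' ' ∉ k.toList) :
    PySem.Str.isIn k (PySem.Str.join " " (skills.map (fun skill => PySem.Str.lower skill)))
      = skills.any (fun skill => PySem.Str.isIn k (PySem.Str.lower skill)) := by
  have hb : ∀ (a b : Bool), ((a = true) ↔ (b = true)) → a = b := by decide
  apply hb
  rw [PySem.Str.isIn_iff_infix, PySem.Str.toList_join, List.map_map, List.any_eq_true]
  have hsep : (" " : String).toList = [' '] := rfl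
  rw [hsep, pv_infix_join_space k.toList hne hsp]
  constructor
  · rintro ⟨p, hp, hinf⟩
    simp only [List.mem_map, Function.comp] at hp
    obtain ⟨sk, hsk, rfl⟩ := hp
    exact ⟨sk, hsk, by rw [PySem.Str.isIn_iff_infix]; simpa using hinf⟩
  · rintro ⟨sk, hsk, hin⟩
    refine ⟨(PySem.Str.lower sk).toList, ?_, ?_⟩
    · simp only [List.mem_map, Function.comp]
      exact ⟨sk, hsk, rfl⟩
    · rw [PySem.Str.isIn_iff_infix] at hin; exact hin

-- ===== VERDICT =====
theorem suggest_practice_projects_py_spec : Claim_equal_suggest_practice_projects_py := by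
  intro skills target_role _
  unfold Spec_suggest_practice_projects_py suggest_practice_projects_py suggest_practice_projects_py_alt pvCatalog
  simp only [List.filter_cons, List.filter_nil, List.any_cons, List.any_nil, Bool.or_false]
  rw [pv_isIn_blob "python" skills (by decide) (by decide),
      pv_isIn_blob "react" skills (by decide) (by decide),
      pv_isIn_blob "aws" skills (by decide) (by decide),
      pv_isIn_blob "cloud" skills (by decide) (by decide)]
  rw [pv_any_or skills (fun skill => PySem.Str.isIn "aws" (PySem.Str.lower skill)) (fun skill => PySem.Str.isIn "cloud" (PySem.Str.lower skill))]
  split_ifs <;> simp_all
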